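-- pv_equiv track=rewrite | github.com/someidiot1234/dredark-econ-dumps | networth.py | netstoplottable
-- ===== SOURCE A (Python) =====
-- class Vividict(dict):
--     # Fancy dictionary
--     def __missing__(self, key):
--         value = self[key] = type(self)()
--         return value
--
-- def netstoplottable(days, shiplist):
--     # Converts the days object into a plottable object
--     # days is the networth of each ship you loaded every day
--     # output is the days networth every day you loaded a ship
--     latest_networth = Vividict()
--     output = Vividict()
--     for hex in shiplist:
--         latest_networth[hex] = 0
--     for day in days:
--         count = 0
--         for ship in days[day]:
--             latest_networth[ship] = days[day][ship]
--         for networth in latest_networth: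
--             count += latest_networth[networth]
--         output[day] = count
--     return output
-- ===== SOURCE B (Python) =====
-- def netstoplottable(days, shiplist):
--     # Two staged passes: pass 1 turns each day into its net delta (sum of
--     # value changes of the ships updated that day); pass 2 prefix-sums the
--     # deltas into the daily totals.  No per-day re-summation of the whole dict.
--     latest = dict.fromkeys(shiplist, 0)
--     deltas = []
--     for day, ships in days.items():
--         delta = 0
--         for ship, value in ships.items():
--             delta += value - latest.get(ship, 0)
--             latest[ship] = value
--         deltas.append((day, delta))
--     output = {}
--     total = 0
--     for day, delta in deltas:
--         total += delta
--         output[day] = total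
--     return output
-- ===== Notes on version B (the rewrite author's own statement) =====
-- stated objective: faster
-- what changed: B works in two staged passes: it first reduces each day to a single net delta of the updated ships' values, then prefix-sums those deltas into the daily totals, instead of A's re-summation of the whole latest_networth dict on every day.
import Mathlib
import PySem

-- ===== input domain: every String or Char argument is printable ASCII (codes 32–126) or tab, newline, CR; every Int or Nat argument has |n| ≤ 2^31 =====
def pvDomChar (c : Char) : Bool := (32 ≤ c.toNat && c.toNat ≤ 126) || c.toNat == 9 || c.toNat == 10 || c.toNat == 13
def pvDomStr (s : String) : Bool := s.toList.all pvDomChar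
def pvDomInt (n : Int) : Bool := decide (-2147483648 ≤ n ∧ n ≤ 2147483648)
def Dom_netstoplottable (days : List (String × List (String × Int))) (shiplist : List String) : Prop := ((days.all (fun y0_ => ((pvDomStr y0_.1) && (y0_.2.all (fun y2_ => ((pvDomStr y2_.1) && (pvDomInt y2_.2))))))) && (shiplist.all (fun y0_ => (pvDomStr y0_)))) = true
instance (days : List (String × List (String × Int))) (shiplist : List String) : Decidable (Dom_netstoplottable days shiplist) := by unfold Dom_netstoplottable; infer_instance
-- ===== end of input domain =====

-- B replaces A's per-day re-summation of latest_networth by two staged passes: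
-- per-day net deltas first, then a prefix sum (objective: faster, asymptotic).

-- ===== PORT A =====
-- for hex in shiplist: latest_networth[hex] = 0; then per day apply updates,
-- then re-sum every value of latest_networth into count, output[day] = count.
def netstoplottable (days : List (String × List (String × Int))) (shiplist : List String) : List (String × Int) :=
  let latest0 : PySem.Dict String Int :=
    shiplist.foldl (fun d hex => d.insert hex 0) PySem.Dict.empty
  let st := days.foldl
    (fun (st : PySem.Dict String Int × PySem.Dict String Int) day =>
      let latest := day.2.foldl (fun l ship => l.insert ship.1 ship.2) st.1
      let count := latest.items.foldl (fun c kv => c + kv.2) 0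
      (latest, st.2.insert day.1 count))
    (latest0, PySem.Dict.empty)
  st.2.items

-- ===== PORT B =====
-- pass 1a: one day's inner loop — accumulate `delta += value - latest.get(ship, 0)`.
def pvDayDelta : List (String × Int) → PySem.Dict String Int → Int → PySem.Dict String Int × Int
  | [], latest, delta => (latest, delta)
  | (ship, value) :: rest, latest, delta =>
      pvDayDelta rest (latest.insert ship value) (delta + value - latest.getD ship 0)

-- pass 1b: the list `deltas` of (day, delta) pairs.
def pvDeltas : List (String × List (String × Int)) → PySem.Dict String Int → List (String × Int)
  | [], _ => []
  | (day, ships) :: rest, latest =>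
      let p := pvDayDelta ships latest 0
      (day, p.2) :: pvDeltas rest p.1

-- pass 2: prefix-sum the deltas into the output dict.
def pvAccum : List (String × Int) → Int → PySem.Dict String Int → PySem.Dict String Int
  | [], _, output => output
  | (day, delta) :: rest, total, output =>
      pvAccum rest (total + delta) (output.insert day (total + delta))

def netstoplottable_alt (days : List (String × List (String × Int))) (shiplist : List String) : List (String × Int) :=
  let latest0 : PySem.Dict String Int :=
    shiplist.foldl (fun d hex => d.insert hex 0) PySem.Dict.empty
  (pvAccum (pvDeltas days latest0) 0 PySem.Dict.empty).items

-- ===== PRECONDITION & SPEC =====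
-- A is total on dict inputs; no Pre_ needed.
def Spec_netstoplottable (days : List (String × List (String × Int))) (shiplist : List String) (out : List (String × Int)) : Prop := out = netstoplottable_alt days shiplist
instance (days : List (String × List (String × Int))) (shiplist : List String) (out : List (String × Int)) : Decidable (Spec_netstoplottable days shiplist out) := by unfold Spec_netstoplottable; infer_instance

-- ===== CLAIM (what is proved, stated in full; the proofs are below) =====
def Claim_equal_netstoplottable : Prop := ∀ (days : List (String × List (String × Int))) (shiplist : List String), Dom_netstoplottable days shiplist → Spec_netstoplottable days shiplist (netstoplottable days shiplist)

-- ===== LEMMAS AND PROOFS =====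

-- Sum of the values of a dict, as A's per-day summation computes it.
def pvSumV (d : PySem.Dict String Int) : Int := d.items.foldl (fun c kv => c + kv.2) 0

theorem pvFoldl_add_snd (l : List (String × Int)) (c : Int) :
    l.foldl (fun c kv => c + kv.2) c = c + (l.map Prod.snd).sum := by
  induction l generalizing c with
  | nil => simp
  | cons a t ih => simp [List.foldl_cons, ih (c + a.2)]; ring

theorem pvSum_replace (l : List (String × Int)) (k : String) (v : Int)
    (hnd : (l.map Prod.fst).Nodup) (hc : k ∈ l.map Prod.fst) :
    ((l.map (fun p => if p.1 == k then (k, v) else p)).map Prod.snd).sum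
      = (l.map Prod.snd).sum + v - (PySem.Dict.mk l).getD k 0 := by
  induction l with
  | nil => simp at hc
  | cons a t ih =>
    obtain ⟨a1, a2⟩ := a
    simp only [List.map_cons, List.nodup_cons, List.mem_cons] at hnd hc
    by_cases hk : a1 = k
    · have hbeq : (a1 == k) = true := by simp [hk]
      have htid : ∀ p ∈ t, (if (p.1 == k) = true then (k, v) else p) = p := by
        intro p hp
        have hpk : p.1 ≠ k := fun h => hnd.1 ((List.mem_map).2 ⟨p, hp, h.trans hk.symm⟩)
        simp [hpk]
      have hmt : t.map (fun p => if (p.1 == k) = true then (k, v) else p) = t :=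
        (List.map_congr_left htid).trans (List.map_id' t)
      have hget : (PySem.Dict.mk ((a1, a2) :: t)).getD k 0 = a2 := by
        simp [PySem.Dict.getD_eq_get?_getD, PySem.Dict.get?_mk_cons, hbeq]
      simp only [List.map_cons, hbeq, if_true, hmt, List.sum_cons, hget]
      omega
    · have hbeq : (a1 == k) = false := by simp [hk]
      have hkt : k ∈ t.map Prod.fst := by
        rcases hc with h | h
        · exact absurd h.symm hk
        · exact h
      have hget : (PySem.Dict.mk ((a1, a2) :: t)).getD k 0 = (PySem.Dict.mk t).getD k 0 := by
        simp [PySem.Dict.getD_eq_get?_getD, PySem.Dict.get?_mk_cons, hbeq]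
      simp only [List.map_cons, hbeq, Bool.false_eq_true, if_false, List.sum_cons,
        hget, ih hnd.2 hkt]
      omega

-- Delta law: inserting (k, v) changes the value-sum by v - old value.
theorem pvSumV_insert (d : PySem.Dict String Int) (k : String) (v : Int)
    (hnd : d.keys.Nodup) :
    pvSumV (d.insert k v) = pvSumV d + v - d.getD k 0 := by
  unfold pvSumV
  rw [pvFoldl_add_snd, pvFoldl_add_snd]
  by_cases hc : d.contains k = true
  · rw [PySem.Dict.items_insert_of_contains d v hc]
    have hk : k ∈ d.items.map Prod.fst := by
      have := (PySem.Dict.contains_iff_mem_keys (d := d) (k := k)).1 hc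
      simpa [PySem.Dict.keys] using this
    have hnd' : (d.items.map Prod.fst).Nodup := by simpa [PySem.Dict.keys] using hnd
    have hrep := pvSum_replace d.items k v hnd' hk
    have hd : PySem.Dict.mk d.items = d := rfl
    rw [hd] at hrep
    rw [hrep]
    omega
  · have hc' : d.contains k = false := by simpa using hc
    rw [PySem.Dict.items_insert_of_not_contains d v hc',
      PySem.Dict.getD_of_not_contains d 0 hc']
    simp

-- nodup keys is preserved by an insert-only loop (specialisation used below).
theorem pvNodup_inner (ships : List (String × Int)) (l : PySem.Dict String Int)
    (h : l.keys.Nodup) :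
    ((ships.foldl (fun l ship => l.insert ship.1 ship.2) l).keys).Nodup := by
  induction ships generalizing l with
  | nil => simpa
  | cons a t ih => exact ih _ (PySem.Dict.nodup_keys_insert _ _ _ h)

-- B's per-day delta pass computes A's updated latest together with the
-- change of its value-sum.
theorem pvDayDelta_eq (ships : List (String × Int)) (l : PySem.Dict String Int) (c : Int)
    (hnd : l.keys.Nodup) :
    pvDayDelta ships l c
      = (ships.foldl (fun l ship => l.insert ship.1 ship.2) l,
         c + pvSumV (ships.foldl (fun l ship => l.insert ship.1 ship.2) l) - pvSumV l) := by
  induction ships generalizing l c with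
  | nil => simp [pvDayDelta]
  | cons a s ih =>
    obtain ⟨k, v⟩ := a
    simp only [pvDayDelta, List.foldl_cons]
    rw [ih _ _ (PySem.Dict.nodup_keys_insert _ _ _ hnd)]
    rw [pvSumV_insert _ _ _ hnd]
    congr 1
    omega

-- Staged passes vs A's single day loop: accumulating pvDeltas from total
-- t = pvSumV l yields exactly A's output dict.
theorem pvStaged (days : List (String × List (String × Int)))
    (l : PySem.Dict String Int) (o : PySem.Dict String Int) (t : Int)
    (hnd : l.keys.Nodup) (ht : t = pvSumV l) :
    pvAccum (pvDeltas days l) t o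
      = (days.foldl
          (fun (st : PySem.Dict String Int × PySem.Dict String Int) day =>
            let latest := day.2.foldl (fun l ship => l.insert ship.1 ship.2) st.1
            let count := latest.items.foldl (fun c kv => c + kv.2) 0
            (latest, st.2.insert day.1 count))
          (l, o)).2 := by
  induction days generalizing l o t with
  | nil => simp [pvDeltas, pvAccum]
  | cons d ds ih =>
    obtain ⟨day, ships⟩ := d
    simp only [pvDeltas, List.foldl_cons]
    rw [pvDayDelta_eq ships l 0 hnd]
    simp only [pvAccum]
    have hcnt : (ships.foldl (fun l ship => l.insert ship.1 ship.2) l).items.foldl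
        (fun c kv => c + kv.2) 0
        = pvSumV (ships.foldl (fun l ship => l.insert ship.1 ship.2) l) := rfl
    rw [ht]
    have harith : pvSumV l + (0 + pvSumV (ships.foldl (fun l ship => l.insert ship.1 ship.2) l) - pvSumV l)
        = pvSumV (ships.foldl (fun l ship => l.insert ship.1 ship.2) l) := by omega
    rw [harith, ← hcnt]
    exact ih _ _ _ (pvNodup_inner ships l hnd) hcnt.symm

theorem pvNodup_latest0 (shiplist : List String) :
    ((shiplist.foldl (fun d hex => d.insert hex 0) (PySem.Dict.empty : PySem.Dict String Int)).keys).Nodup := by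
  exact PySem.Dict.nodup_keys_foldl_insert shiplist _ _ PySem.Dict.nodup_keys_empty

theorem pvSumV_latest0_aux (l : List String) (d : PySem.Dict String Int)
    (hnd : d.keys.Nodup) (hz : ∀ k, d.getD k 0 = 0) (hs : pvSumV d = 0) :
    pvSumV (l.foldl (fun d hex => d.insert hex 0) d) = 0 := by
  induction l generalizing d with
  | nil => simpa using hs
  | cons a t ih =>
    refine ih (d.insert a 0) (PySem.Dict.nodup_keys_insert d a 0 hnd) ?_ ?_
    · intro k
      rw [PySem.Dict.getD_insert]
      split_ifs with h
      · rfl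
      · exact hz k
    · rw [pvSumV_insert d a 0 hnd, hz a, hs]
      omega

theorem pvSumV_latest0 (shiplist : List String) :
    pvSumV (shiplist.foldl (fun d hex => d.insert hex 0) (PySem.Dict.empty : PySem.Dict String Int)) = 0 := by
  exact pvSumV_latest0_aux shiplist PySem.Dict.empty PySem.Dict.nodup_keys_empty
    (fun k => PySem.Dict.getD_empty k 0) rfl

-- ===== VERDICT (by name: the statement is the Claim_ definition above) =====
theorem netstoplottable_spec : Claim_equal_netstoplottable := by
  intro days shiplist _
  unfold Spec_netstoplottable netstoplottable netstoplottable_alt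
  dsimp only
  rw [pvStaged days _ _ _ (pvNodup_latest0 shiplist) (pvSumV_latest0 shiplist).symm]
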